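-- pv_equiv track=rewrite | github.com/tianhaox/aiconfigurator | src/aiconfigurator/generator/api.py | _collect_mapping_backends
-- ===== SOURCE A (Python) =====
-- from typing import Any, Optional
--
-- def _collect_mapping_backends(parameters: list[dict[str, Any]]) -> list[str]:
--     discovered: set[str] = set()
--     for entry in parameters:
--         for key in entry:
--             if key not in {"param_key", "description"}:
--                 discovered.add(str(key))
--     preferred_order = ["trtllm", "vllm", "sglang"]
--     ordered = [name for name in preferred_order if name in discovered]
--     ordered.extend(sorted(name for name in discovered if name not in preferred_order))
--     return ordered
-- ===== SOURCE B (Python) =====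
-- # B: one streaming pass. Instead of collecting a set and then partitioning + sorting,
-- # B tracks each preferred backend with a boolean flag and keeps the remaining names
-- # in a sorted, duplicate-free list maintained by in-place sorted insertion.
-- def _collect_mapping_backends(parameters: list[dict[str, str]]) -> list[str]:
--     has_trtllm = has_vllm = has_sglang = False
--     others: list[str] = []  # kept sorted and without duplicates
--     for entry in parameters:
--         for key in entry:
--             if key == "param_key" or key == "description":
--                 continue
--             if key == "trtllm":
--                 has_trtllm = True
--             elif key == "vllm":
--                 has_vllm = True
--             elif key == "sglang":
--                 has_sglang = True
--             else:
--                 _insert_sorted(others, key)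
--     result = []
--     if has_trtllm:
--         result.append("trtllm")
--     if has_vllm:
--         result.append("vllm")
--     if has_sglang:
--         result.append("sglang")
--     return result + others
--
-- def _insert_sorted(xs: list[str], x: str) -> None:
--     i = 0
--     while i < len(xs) and xs[i] < x:
--         i += 1
--     if i == len(xs) or xs[i] != x:
--         xs.insert(i, x)
-- ===== Notes on version B (the rewrite author's own statement) =====
-- stated objective: alternative
-- what changed: A collects all keys into a set and then builds the output in two phases (filter preferred_order by set membership, then sort the non-preferred remainder); B never builds a set or calls sorted: it streams the keys once, tracking each preferred backend with a boolean flag and maintaining the other names as a sorted duplicate-free list by in-place sorted insertion, then concatenates flags and list.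
import Mathlib
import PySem

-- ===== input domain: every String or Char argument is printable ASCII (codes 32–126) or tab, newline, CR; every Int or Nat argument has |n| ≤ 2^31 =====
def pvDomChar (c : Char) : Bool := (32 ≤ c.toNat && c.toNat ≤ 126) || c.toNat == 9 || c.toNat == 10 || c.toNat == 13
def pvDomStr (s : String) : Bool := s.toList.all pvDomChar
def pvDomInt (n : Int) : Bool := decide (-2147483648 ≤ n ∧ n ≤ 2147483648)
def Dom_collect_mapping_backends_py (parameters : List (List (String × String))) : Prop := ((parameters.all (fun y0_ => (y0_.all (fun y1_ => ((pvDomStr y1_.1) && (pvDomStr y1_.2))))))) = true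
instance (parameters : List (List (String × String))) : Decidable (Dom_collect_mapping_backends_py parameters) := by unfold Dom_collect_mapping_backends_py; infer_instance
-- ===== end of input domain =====

-- B streams the keys once, tracking the preferred backends with boolean flags and keeping
-- the other names in a sorted duplicate-free list by sorted insertion (no set, no final sort);
-- objective: alternative decomposition.

-- ===== PORT A =====
def collect_mapping_backends_py (parameters : List (List (String × String))) : List String :=
  let discovered : PySem.Set String :=
    parameters.foldl (fun s entry =>
      entry.foldl (fun s kv =>
        if !(kv.1 == "param_key" || kv.1 == "description") then PySem.Set.add s kv.1 else s) s)
      PySem.Set.empty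
  let preferred_order : List String := ["trtllm", "vllm", "sglang"]
  let ordered := preferred_order.filter (fun name => PySem.Set.contains discovered name)
  ordered ++ PySem.List.sorted (discovered.filter (fun name => !(preferred_order.contains name))) (fun x => x) false

-- ===== PORT B =====
-- _insert_sorted: walk past the smaller elements, insert unless already present.
def pvInsertSorted (xs : List String) (x : String) : List String :=
  match xs with
  | [] => [x]
  | y :: ys => if y < x then y :: pvInsertSorted ys x
               else if y ≠ x then x :: y :: ys else y :: ys

def pvStepB (st : Bool × Bool × Bool × List String) (key : String) : Bool × Bool × Bool × List String :=
  if key == "param_key" || key == "description" then st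
  else if key == "trtllm" then (true, st.2.1, st.2.2.1, st.2.2.2)
  else if key == "vllm" then (st.1, true, st.2.2.1, st.2.2.2)
  else if key == "sglang" then (st.1, st.2.1, true, st.2.2.2)
  else (st.1, st.2.1, st.2.2.1, pvInsertSorted st.2.2.2 key)

def collect_mapping_backends_py_alt (parameters : List (List (String × String))) : List String :=
  let st := parameters.foldl (fun st entry => entry.foldl (fun st kv => pvStepB st kv.1) st)
    (false, false, false, ([] : List String))
  ((if st.1 then ["trtllm"] else []) ++ (if st.2.1 then ["vllm"] else []) ++
    (if st.2.2.1 then ["sglang"] else [])) ++ st.2.2.2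

-- ===== PRECONDITION & SPEC =====
def Spec_collect_mapping_backends_py (parameters : List (List (String × String))) (out : List String) : Prop := out = collect_mapping_backends_py_alt parameters
instance (parameters : List (List (String × String))) (out : List String) : Decidable (Spec_collect_mapping_backends_py parameters out) := by unfold Spec_collect_mapping_backends_py; infer_instance

-- ===== CLAIM (what is proved, stated in full; the proofs are below) =====
def Claim_equal_collect_mapping_backends_py : Prop := ∀ (parameters : List (List (String × String))), Dom_collect_mapping_backends_py parameters → Spec_collect_mapping_backends_py parameters (collect_mapping_backends_py parameters)

-- ===== LEMMAS AND PROOFS =====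

theorem pvMem_insertSorted (xs : List String) (x a : String) :
    a ∈ pvInsertSorted xs x ↔ a = x ∨ a ∈ xs := by
  induction xs with
  | nil => simp [pvInsertSorted]
  | cons y ys ih =>
      rw [pvInsertSorted]
      by_cases h1 : y < x
      · rw [if_pos h1]
        simp only [List.mem_cons, ih]
        tauto
      · rw [if_neg h1]
        by_cases h2 : y = x
        · subst h2
          rw [if_neg (by simp)]
          simp only [List.mem_cons]
          tauto
        · rw [if_pos h2]
          simp only [List.mem_cons]

theorem pvPairwise_insertSorted (xs : List String) (x : String)
    (h : xs.Pairwise (· < ·)) : (pvInsertSorted xs x).Pairwise (· < ·) := by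
  induction xs with
  | nil => simp [pvInsertSorted]
  | cons y ys ih =>
      rw [List.pairwise_cons] at h
      by_cases h1 : y < x
      · rw [pvInsertSorted, if_pos h1, List.pairwise_cons]
        refine ⟨?_, ih h.2⟩
        intro a ha
        rcases (pvMem_insertSorted ys x a).mp ha with rfl | ha
        · exact h1
        · exact h.1 a ha
      · by_cases h2 : y = x
        · subst h2; rw [pvInsertSorted, if_neg h1, if_neg (by simp)]
          exact List.pairwise_cons.mpr h
        · rw [pvInsertSorted, if_neg h1, if_pos (Ne.symm (Ne.symm h2))]
          rw [List.pairwise_cons]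
          have hyx : x < y := lt_of_le_of_ne (not_lt.mp h1) (Ne.symm h2)
          refine ⟨?_, List.pairwise_cons.mpr h⟩
          intro a ha
          rcases List.mem_cons.mp ha with rfl | ha
          · exact hyx
          · exact lt_trans hyx (h.1 a ha)

-- The invariant relating A's discovered set to B's state.
def pvR (s : PySem.Set String) (st : Bool × Bool × Bool × List String) : Prop :=
  st.1 = PySem.Set.contains s "trtllm" ∧
  st.2.1 = PySem.Set.contains s "vllm" ∧
  st.2.2.1 = PySem.Set.contains s "sglang" ∧
  st.2.2.2.Pairwise (· < ·) ∧
  (∀ a, a ∈ st.2.2.2 ↔ a ∈ s ∧ a ≠ "trtllm" ∧ a ≠ "vllm" ∧ a ≠ "sglang") ∧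
  s.Nodup

theorem pvStep (s : PySem.Set String) (st : Bool × Bool × Bool × List String)
    (key : String) (h : pvR s st) :
    pvR (if !(key == "param_key" || key == "description") then PySem.Set.add s key else s)
        (pvStepB st key) := by
  obtain ⟨h1, h2, h3, h4, h5, h6⟩ := h
  by_cases hskip : key = "param_key" ∨ key = "description"
  · have hb : (key == "param_key" || key == "description") = true := by
      rcases hskip with rfl | rfl <;> simp
    simpa [pvStepB, hb] using ⟨h1, h2, h3, h4, h5, h6⟩
  · obtain ⟨hs1, hs2⟩ := not_or.mp hskip
    have hb : (key == "param_key" || key == "description") = false := by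
      simp [hs1, hs2]
    rw [show (if !(key == "param_key" || key == "description") then PySem.Set.add s key else s)
          = PySem.Set.add s key by simp [hb]]
    have hnd : (PySem.Set.add s key).Nodup := PySem.Set.nodup_add s key h6
    have hmem : ∀ a : String, a ∈ PySem.Set.add s key ↔ a ∈ s ∨ a = key := by
      intro a; exact PySem.Set.mem_add s key a
    have hcon : ∀ a : String, PySem.Set.contains (PySem.Set.add s key) a
        = (PySem.Set.contains s a || (a == key)) := by
      intro a
      apply Bool.eq_iff_iff.mpr
      rw [Bool.or_eq_true, beq_iff_eq, PySem.Set.contains_iff, PySem.Set.contains_iff]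
      exact hmem a
    by_cases hk1 : key = "trtllm"
    · subst hk1
      have hB : pvStepB st "trtllm" = (true, st.2.1, st.2.2.1, st.2.2.2) := by
        simp [pvStepB]
      rw [hB]
      refine ⟨?_, ?_, ?_, h4, ?_, hnd⟩
      · rw [hcon]; simp
      · rw [hcon, h2]; simp
      · rw [hcon, h3]; simp
      · intro a
        rw [h5]
        constructor
        · rintro ⟨hs, hne⟩; exact ⟨(hmem a).mpr (Or.inl hs), hne⟩
        · rintro ⟨hin, hne⟩
          rcases (hmem a).mp hin with hs | rfl
          · exact ⟨hs, hne⟩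
          · exact absurd rfl hne.1
    · by_cases hk2 : key = "vllm"
      · subst hk2
        have hB : pvStepB st "vllm" = (st.1, true, st.2.2.1, st.2.2.2) := by
          simp [pvStepB]
        rw [hB]
        refine ⟨?_, ?_, ?_, h4, ?_, hnd⟩
        · rw [hcon, h1]; simp
        · rw [hcon]; simp
        · rw [hcon, h3]; simp
        · intro a
          rw [h5]
          constructor
          · rintro ⟨hs, hne⟩; exact ⟨(hmem a).mpr (Or.inl hs), hne⟩
          · rintro ⟨hin, hne⟩
            rcases (hmem a).mp hin with hs | rfl
            · exact ⟨hs, hne⟩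
            · exact absurd rfl hne.2.1
      · by_cases hk3 : key = "sglang"
        · subst hk3
          have hB : pvStepB st "sglang" = (st.1, st.2.1, true, st.2.2.2) := by
            simp [pvStepB]
          rw [hB]
          refine ⟨?_, ?_, ?_, h4, ?_, hnd⟩
          · rw [hcon, h1]; simp
          · rw [hcon, h2]; simp
          · rw [hcon]; simp
          · intro a
            rw [h5]
            constructor
            · rintro ⟨hs, hne⟩; exact ⟨(hmem a).mpr (Or.inl hs), hne⟩
            · rintro ⟨hin, hne⟩
              rcases (hmem a).mp hin with hs | rfl
              · exact ⟨hs, hne⟩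
              · exact absurd rfl hne.2.2
        · have hB : pvStepB st key
              = (st.1, st.2.1, st.2.2.1, pvInsertSorted st.2.2.2 key) := by
            simp [pvStepB, hb, hk1, hk2, hk3]
          rw [hB]
          refine ⟨?_, ?_, ?_, pvPairwise_insertSorted _ _ h4, ?_, hnd⟩
          · rw [hcon, h1]; simp [Ne.symm hk1]
          · rw [hcon, h2]; simp [Ne.symm hk2]
          · rw [hcon, h3]; simp [Ne.symm hk3]
          · intro a
            rw [pvMem_insertSorted, h5]
            constructor
            · rintro (rfl | ⟨hs, hne⟩)
              · exact ⟨(hmem a).mpr (Or.inr rfl), hk1, hk2, hk3⟩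
              · exact ⟨(hmem a).mpr (Or.inl hs), hne⟩
            · rintro ⟨hin, hne⟩
              rcases (hmem a).mp hin with hs | rfl
              · exact Or.inr ⟨hs, hne⟩
              · exact Or.inl rfl

theorem pvFold_inner (e : List (String × String)) (s : PySem.Set String)
    (st : Bool × Bool × Bool × List String) (h : pvR s st) :
    pvR (e.foldl (fun s kv =>
          if !(kv.1 == "param_key" || kv.1 == "description") then PySem.Set.add s kv.1 else s) s)
        (e.foldl (fun st kv => pvStepB st kv.1) st) := by
  induction e generalizing s st with
  | nil => exact h
  | cons kv t ih => exact ih _ _ (pvStep s st kv.1 h)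

theorem pvFold_outer (ps : List (List (String × String))) (s : PySem.Set String)
    (st : Bool × Bool × Bool × List String) (h : pvR s st) :
    pvR (ps.foldl (fun s entry =>
          entry.foldl (fun s kv =>
            if !(kv.1 == "param_key" || kv.1 == "description") then PySem.Set.add s kv.1 else s) s) s)
        (ps.foldl (fun st entry => entry.foldl (fun st kv => pvStepB st kv.1) st) st) := by
  induction ps generalizing s st with
  | nil => exact h
  | cons e t ih => exact ih _ _ (pvFold_inner e s st h)

theorem pvFinal (s : PySem.Set String) (st : Bool × Bool × Bool × List String)
    (h : pvR s st) :
    (["trtllm", "vllm", "sglang"].filter (fun name => PySem.Set.contains s name)) ++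
      PySem.List.sorted (s.filter (fun name => !(["trtllm", "vllm", "sglang"].contains name))) (fun x => x) false
    = ((if st.1 then ["trtllm"] else []) ++ (if st.2.1 then ["vllm"] else []) ++
        (if st.2.2.1 then ["sglang"] else [])) ++ st.2.2.2 := by
  obtain ⟨h1, h2, h3, h4, h5, h6⟩ := h
  have hfil : (["trtllm", "vllm", "sglang"].filter (fun name => PySem.Set.contains s name))
      = (if st.1 then ["trtllm"] else []) ++ (if st.2.1 then ["vllm"] else []) ++
        (if st.2.2.1 then ["sglang"] else []) := by
    rw [h1, h2, h3]
    by_cases ht : "trtllm" ∈ s <;> by_cases hv : "vllm" ∈ s <;> by_cases hg : "sglang" ∈ s <;>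
      simp [List.filter, ht, hv, hg]
  have hsort : PySem.List.sorted
      (s.filter (fun name => !(["trtllm", "vllm", "sglang"].contains name))) (fun x => x) false
      = st.2.2.2 := by
    apply PySem.List.sorted_eq_of_perm_of_pairwise_lt
    · have hndo : st.2.2.2.Nodup := h4.imp (fun hlt => ne_of_lt hlt)
      rw [List.perm_ext_iff_of_nodup hndo (h6.filter _)]
      intro a
      rw [h5, List.mem_filter]
      simp [and_assoc]
    · exact h4
  rw [hfil, hsort]

-- ===== VERDICT (by name: the statement is the Claim_ definition above) =====
theorem collect_mapping_backends_py_spec : Claim_equal_collect_mapping_backends_py := by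
  intro parameters _
  unfold Spec_collect_mapping_backends_py collect_mapping_backends_py collect_mapping_backends_py_alt
  exact pvFinal _ _ (pvFold_outer parameters PySem.Set.empty (false, false, false, []) (by
    refine ⟨rfl, rfl, rfl, List.Pairwise.nil, ?_, List.nodup_nil⟩
    intro a; simp [PySem.Set.empty]))
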